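-- pv_equiv track=rewrite | github.com/kevmoeman/sketchbook | sketchbook.py | swirlin_clockwise
-- ===== SOURCE A (Python) =====
-- def swirlin_clockwise(word):
--     swirly = True
--     direction = 1
--     L = word[0]
--     R = word[1]
--     #initial check to see if the word is clockwise
--     if R < L:
--         swirly = False
--         return swirly
--     for i in range(2, len(word)):
--         #when i is even update L
--         #when i is odd update R
--         direction=i%2
--         cur = word[i]
--         if cur < L or R < cur:
--             swirly = False
--         if direction == 0:
--             L = cur
--         if direction == 1:
--             R = cur
--     return swirly
-- ===== SOURCE B (Python) =====
-- def swirlin_clockwise(word):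
--     # Split the word into the even-indexed "lower rail" and odd-indexed "upper rail":
--     # the word swirls clockwise iff the lower rail never decreases, the upper rail
--     # never increases, and every lower-rail letter fits under its odd neighbours.
--     lows, highs = word[::2], word[1::2]
--     return (all(a <= b for a, b in zip(lows, lows[1:]))
--             and all(b <= a for a, b in zip(highs, highs[1:]))
--             and all(a <= b for a, b in zip(lows, highs))
--             and all(a <= b for a, b in zip(lows[1:], highs)))
-- ===== Notes on version B (the rewrite author's own statement) =====
-- stated objective: alternative
-- what changed: B abandons A's single stateful scan (mutable L/R bounds plus a direction flag): it slices the word into the even-indexed and odd-indexed subsequences and decides the result by four independent zip passes - even rail nondecreasing, odd rail nonincreasing, and the two interleaving comparisons - with no parity branch and no per-character mutable state.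
import Mathlib
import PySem

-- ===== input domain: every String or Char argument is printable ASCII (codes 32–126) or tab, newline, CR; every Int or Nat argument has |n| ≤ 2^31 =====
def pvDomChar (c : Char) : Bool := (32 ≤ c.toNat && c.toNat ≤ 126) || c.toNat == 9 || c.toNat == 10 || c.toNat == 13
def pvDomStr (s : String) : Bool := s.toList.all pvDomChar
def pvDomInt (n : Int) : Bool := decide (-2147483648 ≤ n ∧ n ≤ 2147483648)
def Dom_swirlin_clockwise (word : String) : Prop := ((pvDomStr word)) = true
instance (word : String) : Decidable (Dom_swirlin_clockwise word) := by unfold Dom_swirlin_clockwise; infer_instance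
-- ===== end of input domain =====

-- B replaces A's stateful scan (mutable L/R bounds + direction flag) by slicing the word into its
-- even- and odd-indexed subsequences and checking four independent zip passes; objective: alternative.

-- ===== PORT A =====
-- loop body of A: state (swirly, L, R), index i
def pvStepA (cs : List Char) (st : Bool × Char × Char) (i : Int) : Bool × Char × Char :=
  let cur := PySem.List.pyGetD cs i ' '
  let sw := if cur < st.2.1 ∨ st.2.2 < cur then false else st.1
  let L := if PySem.Int.mod i 2 = 0 then cur else st.2.1
  let R := if PySem.Int.mod i 2 = 1 then cur else st.2.2
  (sw, L, R)

def swirlin_clockwise (word : String) : Bool :=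
  let cs := word.toList
  let L := PySem.List.pyGetD cs 0 ' '   -- word[0]; Pre_ guarantees the index is in range
  let R := PySem.List.pyGetD cs 1 ' '   -- word[1]
  if R < L then false
  else
    ((PySem.List.pyRange 2 (PySem.Str.len word) 1).foldl (pvStepA cs) (true, L, R)).1

-- ===== PORT B =====
def swirlin_clockwise_alt (word : String) : Bool :=
  let cs := word.toList
  let lows := (PySem.List.slice? cs none none 2).getD []        -- word[::2]; step 2 ≠ 0, never none
  let highs := (PySem.List.slice? cs (some 1) none 2).getD []   -- word[1::2]
  (lows.zip (PySem.List.slice lows (some 1) none)).all (fun p => decide (p.1 ≤ p.2)) &&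
  (highs.zip (PySem.List.slice highs (some 1) none)).all (fun p => decide (p.2 ≤ p.1)) &&
  (lows.zip highs).all (fun p => decide (p.1 ≤ p.2)) &&
  ((PySem.List.slice lows (some 1) none).zip highs).all (fun p => decide (p.1 ≤ p.2))

-- ===== PRECONDITION & SPEC =====
-- Pre_ excludes words of length < 2, on which A raises IndexError at word[1] (or word[0]).
def Pre_swirlin_clockwise (word : String) : Prop := 2 ≤ word.toList.length
instance (word : String) : Decidable (Pre_swirlin_clockwise word) := by unfold Pre_swirlin_clockwise; infer_instance
def pvWitness_swirlin_clockwise : String := "abba"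

def Spec_swirlin_clockwise (word : String) (out : Bool) : Prop := out = swirlin_clockwise_alt word
instance (word : String) (out : Bool) : Decidable (Spec_swirlin_clockwise word out) := by unfold Spec_swirlin_clockwise; infer_instance

-- ===== CLAIM (what is proved, stated in full; the proofs are below) =====
def Claim_equal_swirlin_clockwise : Prop := ∀ (word : String), Dom_swirlin_clockwise word → Pre_swirlin_clockwise word → Spec_swirlin_clockwise word (swirlin_clockwise word)

-- ===== LEMMAS AND PROOFS =====

-- per-index reading of A's loop step at index i (proof-side only)
def pvTestB (cs : List Char) (i : Int) : Bool :=
  let a := PySem.List.pyGetD cs (i - 2) ' '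
  let b := PySem.List.pyGetD cs (i - 1) ' '
  let c := PySem.List.pyGetD cs i ' '
  if PySem.Int.mod i 2 = 0 then decide (a ≤ c) && decide (c ≤ b)
  else decide (b ≤ c) && decide (c ≤ a)

-- Prop form of pvTestB at a Nat index
def pvT (cs : List Char) (m : Nat) : Prop :=
  if m % 2 = 0 then cs.getD (m - 2) ' ' ≤ cs.getD m ' ' ∧ cs.getD m ' ' ≤ cs.getD (m - 1) ' '
  else cs.getD (m - 1) ' ' ≤ cs.getD m ' ' ∧ cs.getD m ' ' ≤ cs.getD (m - 2) ' '

-- Char bound check: not (below X or above Y) equals the two-sided comparison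
theorem pv_not_lt (c X Y : Char) (A : Bool) :
    (!decide (c < X) && !decide (Y < c) && A) = (A && (decide (X ≤ c) && decide (c ≤ Y))) := by
  by_cases h1 : c < X
  · simp [h1, not_le_of_gt h1]
  · by_cases h2 : Y < c
    · simp [h1, h2, not_le_of_gt h2]
    · simp [h1, h2, not_lt.mp h1, not_lt.mp h2, Bool.and_comm]

-- loop invariant: after folding over range(2, n), swirly equals the conjunction of the
-- per-index tests, and (L, R) are the predecessors cs[n-2], cs[n-1] with roles fixed by parity of n.
theorem pv_inv (cs : List Char) (n : Nat) (h2 : 2 ≤ n) (hn : n ≤ cs.length) :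
    (PySem.List.pyRange 2 (n : Int) 1).foldl (pvStepA cs)
        (true, cs.getD 0 ' ', cs.getD 1 ' ')
      = ((PySem.List.pyRange 2 (n : Int) 1).all (pvTestB cs),
         cs.getD (n - 2 + n % 2) ' ', cs.getD (n - 1 - n % 2) ' ') := by
  induction n, h2 using Nat.le_induction with
  | base =>
      simp [PySem.List.pyRange_one_eq_nil (by norm_num : (2:Int) ≤ 2)]
  | succ n hn2 ih =>
      have hle : n ≤ cs.length := by omega
      have hcast : ((n + 1 : Nat) : Int) = (n : Int) + 1 := by push_cast; ring
      rw [hcast, PySem.List.pyRange_one_succ_right (by exact_mod_cast hn2),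
          List.foldl_append, List.all_append, ih hle]
      have hm2 : PySem.Int.mod (n : Int) 2 = ((n % 2 : Nat) : Int) := by
        exact_mod_cast PySem.Int.mod_natCast n 2
      have hi0 : PySem.List.pyGetD cs ((n : Int)) ' ' = cs.getD n ' ' := by
        simp
      have hi2 : PySem.List.pyGetD cs ((n : Int) - 2) ' ' = cs.getD (n - 2) ' ' := by
        have : (n : Int) - 2 = ((n - 2 : Nat) : Int) := by omega
        rw [this]; simp
      have hi1 : PySem.List.pyGetD cs ((n : Int) - 1) ' ' = cs.getD (n - 1) ' ' := by
        have : (n : Int) - 1 = ((n - 1 : Nat) : Int) := by omega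
        rw [this]; simp
      have hq := Nat.mod_two_eq_zero_or_one n
      rcases hq with hp | hp
      · -- i = n even: L := cur, R stays
        have e2 : n + 1 - 2 + (n + 1) % 2 = n := by omega
        have e3 : n + 1 - 1 - (n + 1) % 2 = n - 1 := by omega
        simp only [List.foldl_cons, List.foldl_nil, List.all_cons, List.all_nil,
          pvStepA, pvTestB, hm2, hp, hi0, hi1, hi2, e2, e3,
          Nat.add_zero, Nat.sub_zero]
        norm_num
        exact pv_not_lt _ _ _ _
      · -- i = n odd: R := cur, L stays
        have e2 : n + 1 - 2 + (n + 1) % 2 = n - 1 := by omega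
        have e3 : n + 1 - 1 - (n + 1) % 2 = n := by omega
        have e4 : n - 2 + 1 = n - 1 := by omega
        have e5 : n - 1 - 1 = n - 2 := by omega
        simp only [List.foldl_cons, List.foldl_nil, List.all_cons, List.all_nil,
          pvStepA, pvTestB, hm2, hp, hi0, hi1, hi2, e2, e3, e4, e5]
        norm_num
        exact pv_not_lt _ _ _ _

-- word[::2] is the even-indexed subsequence, read off by index
theorem pv_slice2 (cs : List Char) :
    (PySem.List.slice? cs none none 2).getD [] =
      (List.range ((cs.length + 1) / 2)).map (fun k => cs.getD (2 * k) ' ') := by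
  unfold PySem.List.slice? PySem.List.sliceIndices
  norm_num
  have hcount : (if 0 < cs.length then (((cs.length : Int) + 2 - 1) / 2).toNat else 0)
      = (cs.length + 1) / 2 := by split <;> omega
  rw [hcount]
  rw [List.filterMap_congr (g := fun x => some (cs[2 * x]?.getD ' ')) ?_]
  · exact congrFun (List.filterMap_eq_map (f := fun k => cs[2 * k]?.getD ' ')) _
  · intro x hx
    have hx' : x < (cs.length + 1) / 2 := List.mem_range.mp hx
    have h2x : 2 * x < cs.length := by omega
    have ht : ((2 * (x : Int))).toNat = 2 * x := by omega
    rw [ht, List.getElem?_eq_getElem h2x]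
    simp [List.getElem?_eq_getElem h2x]

-- word[1::2] is the odd-indexed subsequence
theorem pv_slice2_one (cs : List Char) :
    (PySem.List.slice? cs (some 1) none 2).getD [] =
      (List.range (cs.length / 2)).map (fun k => cs.getD (2 * k + 1) ' ') := by
  unfold PySem.List.slice? PySem.List.sliceIndices
  norm_num
  rcases Nat.eq_zero_or_pos cs.length with h0 | h0
  · simp [h0]
  · have hmin : min 1 (cs.length : Int) = 1 := by omega
    rw [hmin]
    have hcount : (if 1 < cs.length then (((cs.length : Int) - 1 + 2 - 1) / 2).toNat else 0)
        = cs.length / 2 := by split <;> omega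
    rw [hcount]
    rw [List.filterMap_congr (g := fun x => some (cs[2 * x + 1]?.getD ' ')) ?_]
    · exact congrFun (List.filterMap_eq_map (f := fun k => cs[2 * k + 1]?.getD ' ')) _
    · intro x hx
      have hx' : x < cs.length / 2 := List.mem_range.mp hx
      have h2x : 2 * x + 1 < cs.length := by omega
      have ht : ((1 + 2 * (x : Int))).toNat = 2 * x + 1 := by omega
      rw [ht, List.getElem?_eq_getElem h2x]
      simp [List.getElem?_eq_getElem h2x]

-- all over a zip, by index
theorem pv_all_zip {α β : Type} (xs : List α) (ys : List β) (p : α → β → Bool) :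
    ((xs.zip ys).all (fun q => p q.1 q.2) = true) ↔
      ∀ (k : Nat) (hx : k < xs.length) (hy : k < ys.length), p xs[k] ys[k] = true := by
  rw [List.all_eq_true]
  constructor
  · intro h k hx hy
    have hk : k < (xs.zip ys).length := by simp [List.length_zip]; omega
    have hmem : (xs.zip ys)[k] ∈ xs.zip ys := List.getElem_mem hk
    have := h _ hmem
    rwa [List.getElem_zip] at this
  · intro h q hq
    obtain ⟨k, hk, rfl⟩ := List.mem_iff_getElem.mp hq
    rw [List.getElem_zip]
    have hk' : k < xs.length ∧ k < ys.length := by simp [List.length_zip] at hk; omega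
    exact h k hk'.1 hk'.2

-- all over range(2, n), by Nat index
theorem pv_all_pyRange (f : Int → Bool) (n : Nat) :
    (((PySem.List.pyRange 2 (n : Int) 1).all f) = true) ↔
      ∀ m : Nat, 2 ≤ m → m < n → f (m : Int) = true := by
  rw [List.all_eq_true]
  constructor
  · intro h m h2 hm
    exact h _ ((PySem.List.mem_pyRange_one).mpr ⟨by exact_mod_cast h2, by exact_mod_cast hm⟩)
  · intro h i hi
    have hi' := (PySem.List.mem_pyRange_one).mp hi
    obtain ⟨m, rfl⟩ := Int.eq_ofNat_of_zero_le (by omega : (0:Int) ≤ i)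
    exact h m (by exact_mod_cast hi'.1) (by exact_mod_cast hi'.2)

theorem pv_testB_iff (cs : List Char) (m : Nat) (h2 : 2 ≤ m) :
    pvTestB cs (m : Int) = true ↔ pvT cs m := by
  unfold pvTestB pvT
  have hm2 : PySem.Int.mod (m : Int) 2 = ((m % 2 : Nat) : Int) := by
    exact_mod_cast PySem.Int.mod_natCast m 2
  have hi2 : (m : Int) - 2 = ((m - 2 : Nat) : Int) := by omega
  have hi1 : (m : Int) - 1 = ((m - 1 : Nat) : Int) := by omega
  rw [hm2, hi2, hi1]
  simp only [PySem.List.pyGetD_natCast]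
  rcases Nat.mod_two_eq_zero_or_one m with hp | hp <;> simp [hp]

-- the heart: A's guard + per-index tests regroup into B's four rail conditions
theorem pv_main (cs : List Char) (hn : 2 ≤ cs.length) :
    ((¬ cs.getD 1 ' ' < cs.getD 0 ' ') ∧ ∀ m : Nat, 2 ≤ m → m < cs.length → pvT cs m) ↔
      ((∀ k : Nat, k + 1 < (cs.length + 1) / 2 → cs.getD (2 * k) ' ' ≤ cs.getD (2 * (k + 1)) ' ')
      ∧ (∀ k : Nat, k + 1 < cs.length / 2 → cs.getD (2 * (k + 1) + 1) ' ' ≤ cs.getD (2 * k + 1) ' ')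
      ∧ (∀ k : Nat, k < cs.length / 2 → cs.getD (2 * k) ' ' ≤ cs.getD (2 * k + 1) ' ')
      ∧ (∀ k : Nat, k + 1 < (cs.length + 1) / 2 → k < cs.length / 2 → cs.getD (2 * (k + 1)) ' ' ≤ cs.getD (2 * k + 1) ' ')) := by
  constructor
  · rintro ⟨hg, hT⟩
    have hg' : cs.getD 0 ' ' ≤ cs.getD 1 ' ' := not_lt.mp hg
    refine ⟨?_, ?_, ?_, ?_⟩
    · intro k hk
      have h := hT (2 * k + 2) (by omega) (by omega)
      unfold pvT at h
      rw [if_pos (by omega)] at h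
      rw [show 2 * k + 2 - 2 = 2 * k from by omega] at h
      rw [show 2 * (k + 1) = 2 * k + 2 from by omega]
      exact h.1
    · intro k hk
      have h := hT (2 * k + 3) (by omega) (by omega)
      unfold pvT at h
      rw [if_neg (by omega)] at h
      rw [show 2 * k + 3 - 2 = 2 * k + 1 from by omega] at h
      rw [show 2 * (k + 1) + 1 = 2 * k + 3 from by omega]
      exact h.2
    · intro k hk
      rcases Nat.eq_zero_or_pos k with rfl | hk0
      · simpa using hg'
      · have h := hT (2 * k + 1) (by omega) (by omega)
        unfold pvT at h
        rw [if_neg (by omega)] at h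
        rw [show 2 * k + 1 - 1 = 2 * k from by omega] at h
        exact h.1
    · intro k hk1 hk2
      have h := hT (2 * k + 2) (by omega) (by omega)
      unfold pvT at h
      rw [if_pos (by omega)] at h
      rw [show 2 * k + 2 - 1 = 2 * k + 1 from by omega] at h
      rw [show 2 * (k + 1) = 2 * k + 2 from by omega]
      exact h.2
  · rintro ⟨c1, c2, c3, c4⟩
    refine ⟨?_, ?_⟩
    · have h := c3 0 (by omega)
      simp only [Nat.mul_zero] at h
      exact not_lt.mpr (by simpa using h)
    · intro m h2 hm
      unfold pvT
      rcases Nat.mod_two_eq_zero_or_one m with hp | hp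
      · rw [if_pos hp]
        obtain ⟨k, rfl⟩ : ∃ k, m = 2 * k + 2 := ⟨(m - 2) / 2, by omega⟩
        refine ⟨?_, ?_⟩
        · have h := c1 k (by omega)
          rw [show 2 * (k + 1) = 2 * k + 2 from by omega] at h
          rw [show 2 * k + 2 - 2 = 2 * k from by omega]
          exact h
        · have h := c4 k (by omega) (by omega)
          rw [show 2 * (k + 1) = 2 * k + 2 from by omega] at h
          rw [show 2 * k + 2 - 1 = 2 * k + 1 from by omega]
          exact h
      · rw [if_neg (by omega)]
        obtain ⟨k, rfl⟩ : ∃ k, m = 2 * k + 3 := ⟨(m - 3) / 2, by omega⟩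
        refine ⟨?_, ?_⟩
        · have h := c3 (k + 1) (by omega)
          rw [show 2 * (k + 1) = 2 * k + 2 from by omega] at h
          rw [show 2 * k + 2 + 1 = 2 * k + 3 from by omega] at h
          rw [show 2 * k + 3 - 1 = 2 * k + 2 from by omega]
          exact h
        · have h := c2 k (by omega)
          rw [show 2 * (k + 1) + 1 = 2 * k + 3 from by omega] at h
          rw [show 2 * k + 3 - 2 = 2 * k + 1 from by omega]
          exact h

-- A as a Prop
theorem pv_A_iff (word : String) (hpre : 2 ≤ word.toList.length) :
    swirlin_clockwise word = true ↔
      ((¬ word.toList.getD 1 ' ' < word.toList.getD 0 ' ') ∧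
        ∀ m : Nat, 2 ≤ m → m < word.toList.length → pvT word.toList m) := by
  unfold swirlin_clockwise
  simp only [PySem.Str.len_eq]
  have h0 : PySem.List.pyGetD word.toList (0 : Int) ' ' = word.toList.getD 0 ' ' := by simp [pysem]
  have h1 : PySem.List.pyGetD word.toList (1 : Int) ' ' = word.toList.getD 1 ' ' := by simp [pysem]
  rw [h0, h1, pv_inv word.toList word.toList.length hpre le_rfl]
  split_ifs with hg
  · simp only [false_iff, not_and]
    intro hg'
    exact absurd hg hg'
  · rw [pv_all_pyRange]
    constructor
    · intro h
      exact ⟨hg, fun m h2 hm => (pv_testB_iff word.toList m h2).mp (h m h2 hm)⟩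
    · rintro ⟨-, h⟩ m h2 hm
      exact (pv_testB_iff word.toList m h2).mpr (h m h2 hm)

-- B as a Prop
theorem pv_B_iff (word : String) :
    swirlin_clockwise_alt word = true ↔
      ((∀ k : Nat, k + 1 < (word.toList.length + 1) / 2 → word.toList.getD (2 * k) ' ' ≤ word.toList.getD (2 * (k + 1)) ' ')
      ∧ (∀ k : Nat, k + 1 < word.toList.length / 2 → word.toList.getD (2 * (k + 1) + 1) ' ' ≤ word.toList.getD (2 * k + 1) ' ')
      ∧ (∀ k : Nat, k < word.toList.length / 2 → word.toList.getD (2 * k) ' ' ≤ word.toList.getD (2 * k + 1) ' ')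
      ∧ (∀ k : Nat, k + 1 < (word.toList.length + 1) / 2 → k < word.toList.length / 2 → word.toList.getD (2 * (k + 1)) ' ' ≤ word.toList.getD (2 * k + 1) ' ')) := by
  unfold swirlin_clockwise_alt
  simp only [pv_slice2, pv_slice2_one, PySem.List.slice_from_one]
  simp only [Bool.and_eq_true]
  rw [pv_all_zip (p := fun a b => decide (a ≤ b)), pv_all_zip (p := fun a b => decide (b ≤ a)),
      pv_all_zip (p := fun a b => decide (a ≤ b)), pv_all_zip (p := fun a b => decide (a ≤ b))]
  simp only [List.length_tail, List.length_map, List.length_range, List.getElem_tail,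
    List.getElem_map, List.getElem_range, decide_eq_true_eq]
  constructor
  · rintro ⟨⟨⟨a, b⟩, c⟩, d⟩
    exact ⟨fun k hk => a k (by omega) (by omega), fun k hk => b k (by omega) (by omega),
           fun k hk => c k (by omega) hk, fun k hk1 hk2 => d k (by omega) hk2⟩
  · rintro ⟨a, b, c, d⟩
    exact ⟨⟨⟨fun k h1 h2 => a k (by omega), fun k h1 h2 => b k (by omega)⟩,
           fun k h1 h2 => c k h2⟩, fun k h1 h2 => d k (by omega) h2⟩

-- ===== VERDICT (by name: the statements are the Claim_ definitions above) =====
theorem swirlin_clockwise_spec : Claim_equal_swirlin_clockwise := by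
  intro word _hdom hpre
  unfold Pre_swirlin_clockwise at hpre
  unfold Spec_swirlin_clockwise
  have h := (pv_A_iff word hpre).trans ((pv_main word.toList hpre).trans (pv_B_iff word).symm)
  cases ha : swirlin_clockwise word <;> cases hb : swirlin_clockwise_alt word
  · rfl
  · exact absurd (h.mpr hb) (by simp [ha])
  · exact absurd (h.mp ha) (by simp [hb])
  · rfl
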